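-- pv_equiv track=rewrite | github.com/Jutastre/AoC-2016 | d18/p1.py | sim2
-- ===== SOURCE A (Python) =====
-- def sim2(number):
--     if number <= 1:
--         return 1
--     number -= 1
--     remove = 1
--     while number > 0:
--         number-= 2**remove
--         remove += 1
--     number += (2**(remove-1))
--     return (number*2) - 1
-- ===== SOURCE B (Python) =====
-- def sim2(number):
--     # Closed form: for number >= 2 the loop's answer is 2*number + 1 minus
--     # the least power of two >= number + 1, which is 1 << number.bit_length().
--     if number <= 1:
--         return 1
--     return 2 * number + 1 - (1 << number.bit_length())
-- ===== Notes on version B (the rewrite author's own statement) =====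
-- stated objective: faster
-- what changed: Replaced the iterative subtract-growing-powers-of-two loop by an O(1) closed form: for number >= 2 the answer is 2*number + 1 - (1 << number.bit_length()), the least power of two >= number+1.
import Mathlib
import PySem

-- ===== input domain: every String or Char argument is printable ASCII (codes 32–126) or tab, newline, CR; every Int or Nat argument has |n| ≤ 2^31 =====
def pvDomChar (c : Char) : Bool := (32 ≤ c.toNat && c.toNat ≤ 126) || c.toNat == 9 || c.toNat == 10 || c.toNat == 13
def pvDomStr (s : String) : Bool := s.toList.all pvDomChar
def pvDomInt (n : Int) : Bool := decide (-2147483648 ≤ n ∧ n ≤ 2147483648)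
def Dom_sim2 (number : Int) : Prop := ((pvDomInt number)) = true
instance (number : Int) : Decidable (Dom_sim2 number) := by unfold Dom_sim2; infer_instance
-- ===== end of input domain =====

-- B replaces A's power-of-2 subtraction loop with a closed form via bit_length (alternative O(1) formula).


-- ===== PORT A =====
-- the while loop: state (number, remove)
def sim2Loop (number : Int) (remove : Nat) : Int × Nat :=
  if number > 0 then
    sim2Loop (number - 2 ^ remove) (remove + 1)
  else (number, remove)
termination_by number.toNat
decreasing_by
  have h1 : (0:Int) < 2 ^ remove := pow_pos (by norm_num) remove
  omega

def sim2 (number : Int) : Int :=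
  if number ≤ 1 then 1
  else
    let p := sim2Loop (number - 1) 1
    ((p.1 + 2 ^ (p.2 - 1)) * 2) - 1

-- ===== PORT B =====
-- Python's n.bit_length() for n ≥ 0 is Nat.size
def sim2_alt (number : Int) : Int :=
  if number ≤ 1 then 1
  else 2 * number + 1 - 2 ^ (number.toNat.size)

-- ===== PRECONDITION & SPEC =====
def Spec_sim2 (number : Int) (out : Int) : Prop := out = sim2_alt number
instance (number : Int) (out : Int) : Decidable (Spec_sim2 number out) := by unfold Spec_sim2; infer_instance

-- ===== CLAIM (what is proved, stated in full; the proofs are below) =====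
def Claim_equal_sim2 : Prop := ∀ (number : Int), Dom_sim2 number → Spec_sim2 number (sim2 number)

-- ===== LEMMAS AND PROOFS =====

/-- Characterisation of A's while loop: starting at a positive `n`, it ends at some
`m > r`, having subtracted `2^r + … + 2^(m-1) = 2^m - 2^r`, where `m` is the first
index at which the running value drops to `≤ 0`. -/
lemma sim2Loop_char (k : Nat) : ∀ (n : Int) (r : Nat), n.toNat ≤ k → 0 < n →
    ∃ m, r < m ∧ sim2Loop n r = (n - (2 ^ m - 2 ^ r), m) ∧
      n ≤ 2 ^ m - 2 ^ r ∧ (2 : Int) ^ (m - 1) - 2 ^ r < n := by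
  induction k with
  | zero =>
    intro n r hk hn; omega
  | succ k ih =>
    intro n r hk hn
    have hpr : (0:Int) < 2 ^ r := pow_pos (by norm_num) r
    have hpr1 : (2:Int) ^ (r + 1) = 2 * 2 ^ r := by rw [pow_succ]; ring
    rw [sim2Loop, if_pos hn]
    by_cases h2 : 0 < n - 2 ^ r
    · obtain ⟨m, hm1, hm2, hm3, hm4⟩ := ih (n - 2 ^ r) (r + 1) (by omega) h2
      refine ⟨m, by omega, ?_, by omega, ?_⟩
      · rw [hm2]
        have : (2:Int) ^ (r+1) = 2 * 2 ^ r := hpr1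
        congr 1; omega
      · omega
    · rw [sim2Loop, if_neg (by omega)]
      refine ⟨r + 1, by omega, ?_, by omega, ?_⟩
      · congr 1; omega
      · simp only [Nat.add_sub_cancel]; omega

theorem sim2_spec : Claim_equal_sim2 := by
  intro number _
  unfold Spec_sim2 sim2 sim2_alt
  by_cases h1 : number ≤ 1
  · simp [h1]
  · simp only [if_neg h1]
    have hn : (0:Int) < number - 1 := by omega
    obtain ⟨m, hm1, hm2, hm3, hm4⟩ :=
      sim2Loop_char (number - 1).toNat (number - 1) 1 le_rfl hn
    rw [hm2]
    dsimp only
    have hm1' : 1 ≤ m := by omega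
    have hsplit : (2:Int) ^ m = 2 * 2 ^ (m - 1) := by
      conv_lhs => rw [show m = (m - 1) + 1 by omega]
      rw [pow_succ]; ring
    -- number.toNat.size = m
    have hlt : number.toNat < 2 ^ m := by
      have h21 : (2:Int) ^ 1 = 2 := by norm_num
      have : (number : Int) < 2 ^ m := by omega
      have hcast : ((2 ^ m : Nat) : Int) = (2:Int) ^ m := by push_cast; ring
      omega
    have hge : 2 ^ (m - 1) ≤ number.toNat := by
      have h21 : (2:Int) ^ 1 = 2 := by norm_num
      have : (2:Int) ^ (m - 1) ≤ number := by omega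
      have hcast : ((2 ^ (m - 1) : Nat) : Int) = (2:Int) ^ (m - 1) := by push_cast; ring
      omega
    have hsize : number.toNat.size = m := by
      have hub : number.toNat.size ≤ m := Nat.size_le.mpr hlt
      have hlb : m - 1 < number.toNat.size := Nat.lt_size.mpr hge
      omega
    rw [hsize]
    have h21 : (2:Int) ^ 1 = 2 := by norm_num
    omega
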